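-- pv_equiv track=rewrite | github.com/pcs26g4/qagarden-agentstack | cicd/generate_script.py | get_locator_class
-- ===== SOURCE A (Python) =====
-- def get_locator_class(page: str) -> str:
--     """Get the appropriate locator class for the page"""
--     page_clean = page.replace(" ", "_").replace("-", "_").lower()
--     mapping = {
--         'login': 'LoginLocators',
--         'signup': 'SignupLocators',
--         'welcome': 'WelcomeLocators'
--     }
--     if page_clean in mapping:
--         return mapping[page_clean]
--
--     # Dynamic class name generation
--     return "".join([word.capitalize() for word in page_clean.split("_")]) + "Locators"
-- ===== SOURCE B (Python) =====
-- def get_locator_class(page: str) -> str: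
--     """Get the appropriate locator class for the page"""
--     out = []
--     new_word = True
--     for ch in page:
--         if ch in " -_":
--             new_word = True
--         else:
--             out.append(ch.upper() if new_word else ch.lower())
--             new_word = False
--     return "".join(out) + "Locators"
-- ===== Notes on version B (the rewrite author's own statement) =====
-- stated objective: alternative
-- what changed: Replaced A's staged pipeline (two replaces, lower, lookup table with membership branch, split, per-word capitalize, join) by one single character-level pass with a word-start flag that emits each char upper- or lower-cased directly, skipping separators; the lookup table disappears because the uniform pass already yields its values.
import Mathlib
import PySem

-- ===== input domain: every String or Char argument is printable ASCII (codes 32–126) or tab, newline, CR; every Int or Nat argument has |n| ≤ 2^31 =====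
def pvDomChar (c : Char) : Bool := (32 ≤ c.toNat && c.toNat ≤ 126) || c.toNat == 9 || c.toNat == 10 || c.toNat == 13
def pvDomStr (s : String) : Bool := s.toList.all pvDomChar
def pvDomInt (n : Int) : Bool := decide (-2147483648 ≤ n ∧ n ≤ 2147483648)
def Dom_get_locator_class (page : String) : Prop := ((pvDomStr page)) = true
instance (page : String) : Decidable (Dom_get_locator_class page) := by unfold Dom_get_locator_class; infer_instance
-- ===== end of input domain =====

-- B replaces A's staged pipeline (replace/replace/lower, lookup table, split/capitalize/join)
-- by a single character-level pass with a word-start flag: a different decomposition, same values.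

-- ===== PORT A =====
-- str.capitalize(): first char uppercased, the rest lowercased (exact on ASCII)
def pyCapitalize (s : String) : String :=
  match s.toList with
  | [] => ""
  | c :: rest => String.ofList (PySem.Chars.upperChar c :: PySem.Chars.lower rest)

-- Python `+` on str (exact; via toList because Lean's String.append is kernel-opaque)
def pyStrCat (a b : String) : String := String.ofList (a.toList ++ b.toList)

def get_locator_class (page : String) : String :=
  let page_clean :=
    PySem.Str.lower (PySem.Str.replace (PySem.Str.replace page " " "_") "-" "_")
  let mapping : PySem.Dict String String :=
    ((PySem.Dict.empty.insert "login" "LoginLocators").insert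
        "signup" "SignupLocators").insert "welcome" "WelcomeLocators"
  match mapping.get? page_clean with
  | some v => v
  | none =>
      pyStrCat (PySem.Str.join "" (((PySem.Str.split? page_clean "_").getD []).map pyCapitalize))
        "Locators"

-- ===== PORT B =====
-- the for-loop of Source B: out-list accumulator and new_word flag, one char at a time
def camelGo : List Char → Bool → List Char
  | [], _ => []
  | c :: t, newWord =>
      if c = ' ' ∨ c = '-' ∨ c = '_' then camelGo t true
      else (if newWord then PySem.Chars.upperChar c else PySem.Chars.lowerChar c) :: camelGo t false

def get_locator_class_alt (page : String) : String :=
  String.ofList (camelGo page.toList true ++ "Locators".toList)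

-- ===== PRECONDITION & SPEC =====
def Spec_get_locator_class (page : String) (out : String) : Prop := out = get_locator_class_alt page
instance (page : String) (out : String) : Decidable (Spec_get_locator_class page out) := by unfold Spec_get_locator_class; infer_instance

-- ===== CLAIM (what is proved, stated in full; the proofs are below) =====
def Claim_equal_get_locator_class : Prop := ∀ (page : String), Dom_get_locator_class page → Spec_get_locator_class page (get_locator_class page)

-- ===== LEMMAS AND PROOFS =====

-- ---- character-level facts about PySem's ASCII case maps ----
lemma pvToNat_ofNat (n : Nat) (h : Nat.isValidChar n) : (Char.ofNat n).toNat = n := by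
  unfold Char.ofNat; simp [h]

lemma pvIsupper_iff (c : Char) : PySem.Chars.isupper c = true ↔ 65 ≤ c.toNat ∧ c.toNat ≤ 90 := by
  have e1 : ('A' ≤ c) ↔ 65 ≤ c.toNat := ge_iff_le
  have e2 : (c ≤ 'Z') ↔ c.toNat ≤ 90 := ge_iff_le
  simp [PySem.Chars.isupper, e1, e2]

lemma pvIslower_iff (c : Char) : PySem.Chars.islower c = true ↔ 97 ≤ c.toNat ∧ c.toNat ≤ 122 := by
  have e1 : ('a' ≤ c) ↔ 97 ≤ c.toNat := ge_iff_le
  have e2 : (c ≤ 'z') ↔ c.toNat ≤ 122 := ge_iff_le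
  simp [PySem.Chars.islower, e1, e2]

lemma pvUp_low (c : Char) : PySem.Chars.upperChar (PySem.Chars.lowerChar c) = PySem.Chars.upperChar c := by
  by_cases h : PySem.Chars.isupper c = true
  · have h1 := (pvIsupper_iff c).mp h
    have ht : (Char.ofNat (c.toNat + 32)).toNat = c.toNat + 32 := pvToNat_ofNat _ (Or.inl (by omega))
    have hlo : PySem.Chars.islower (Char.ofNat (c.toNat + 32)) = true := by
      rw [pvIslower_iff, ht]; omega
    have hup : PySem.Chars.islower c = false := by
      rw [Bool.eq_false_iff, Ne, pvIslower_iff]; omega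
    rw [PySem.Chars.lowerChar, if_pos h, PySem.Chars.upperChar, if_pos hlo, ht,
      Nat.add_sub_cancel, Char.ofNat_toNat, PySem.Chars.upperChar, if_neg (by simp [hup])]
  · simp [PySem.Chars.lowerChar, h]

lemma pvLow_idem (c : Char) : PySem.Chars.lowerChar (PySem.Chars.lowerChar c) = PySem.Chars.lowerChar c := by
  by_cases h : PySem.Chars.isupper c = true
  · have h1 := (pvIsupper_iff c).mp h
    have ht : (Char.ofNat (c.toNat + 32)).toNat = c.toNat + 32 := pvToNat_ofNat _ (Or.inl (by omega))
    have h2 : PySem.Chars.isupper (Char.ofNat (c.toNat + 32)) = false := by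
      rw [Bool.eq_false_iff, Ne, pvIsupper_iff, ht]; omega
    have hl : PySem.Chars.lowerChar c = Char.ofNat (c.toNat + 32) := by
      rw [PySem.Chars.lowerChar, if_pos h]
    rw [hl, PySem.Chars.lowerChar, if_neg (by simp [h2])]
  · simp [PySem.Chars.lowerChar, h]

lemma pvLow_ne_us (c : Char) (hc : c ≠ '_') : PySem.Chars.lowerChar c ≠ '_' := by
  by_cases h : PySem.Chars.isupper c = true
  · have h1 := (pvIsupper_iff c).mp h
    have ht : (Char.ofNat (c.toNat + 32)).toNat = c.toNat + 32 := pvToNat_ofNat _ (Or.inl (by omega))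
    rw [PySem.Chars.lowerChar, if_pos h]
    intro he
    have h2 : (Char.ofNat (c.toNat + 32)).toNat = ('_' : Char).toNat := by rw [he]
    rw [ht] at h2
    have h95 : ('_' : Char).toNat = 95 := by decide
    omega
  · simpa [PySem.Chars.lowerChar, h]

-- the composed normalization A applies per character
def pvNorm (c : Char) : Char :=
  PySem.Chars.lowerChar (if c = ' ' ∨ c = '-' then '_' else c)

lemma pvNorm_comp (c : Char) :
    PySem.Chars.lowerChar
      ((fun c => if c = '-' then '_' else c) ((fun c => if c = ' ' then '_' else c) c)) = pvNorm c := by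
  by_cases h1 : c = ' '
  · subst h1; decide
  · by_cases h2 : c = '-'
    · subst h2; decide
    · simp [pvNorm, h1, h2]

-- ---- single-char replace: PySem.Chars.replace is a map ----
lemma pvReplace_go_single (o n : Char) (fuel : Nat) :
    ∀ (l acc : List Char), l.length ≤ fuel →
      PySem.Chars.replace.go [o] [n] fuel l acc
        = acc.reverse ++ l.map (fun c => if c = o then n else c) := by
  induction fuel with
  | zero =>
      intro l acc h
      have : l = [] := List.eq_nil_of_length_eq_zero (Nat.le_zero.mp h)
      subst this
      rw [PySem.Chars.replace.go]; simp
  | succ fuel ih =>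
      intro l acc h
      cases l with
      | nil => rw [PySem.Chars.replace.go]; simp; omega
      | cons c t =>
          rw [PySem.Chars.replace.go]
          have hp : ([o].isPrefixOf (c :: t)) = (o == c) := by simp [List.isPrefixOf]
          by_cases hoc : o = c
          · subst hoc
            simp only [hp, beq_self_eq_true, if_pos, List.length_cons, List.length_nil,
              Nat.zero_add, List.drop_succ_cons, List.drop_zero]
            rw [ih _ _ (by simpa using Nat.le_of_succ_le_succ h)]
            simp
          · have : (o == c) = false := by simpa using hoc
            simp only [hp, this, Bool.false_eq_true, if_false]
            rw [ih t (c :: acc) (by simpa using Nat.le_of_succ_le_succ h)]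
            simp [Ne.symm hoc]

lemma pvReplace_single (o n : Char) (l : List Char) :
    PySem.Chars.replace l [o] [n] = l.map (fun c => if c = o then n else c) := by
  rw [PySem.Chars.replace]
  simp only [List.isEmpty_cons, Bool.false_eq_true, if_false]
  simpa using pvReplace_go_single o n l.length l [] le_rfl

-- ---- single-char split: PySem.Chars.splitOn is Mathlib's List.splitOn ----
lemma pvModifyHead_id {α : Type} (l : List α) : List.modifyHead (fun x => x) l = l := by
  cases l <;> simp

lemma pvSplitOn_cons (a c : Char) (t : List Char) :
    (c :: t).splitOn a
      = if c = a then [] :: t.splitOn a else (t.splitOn a).modifyHead (c :: ·) := by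
  simp only [List.splitOn, List.splitOnP_cons, beq_iff_eq]

lemma pvSplitOn_go_single (a : Char) (fuel : Nat) :
    ∀ (l cur : List Char) (acc : List (List Char)), l.length ≤ fuel →
      PySem.Chars.splitOn.go [a] fuel l cur acc
        = acc.reverse ++ (l.splitOn a).modifyHead (cur.reverse ++ ·) := by
  induction fuel with
  | zero =>
      intro l cur acc h
      have : l = [] := List.eq_nil_of_length_eq_zero (Nat.le_zero.mp h)
      subst this
      rw [PySem.Chars.splitOn.go]; simp
  | succ fuel ih =>
      intro l cur acc h
      cases l with
      | nil => rw [PySem.Chars.splitOn.go]; simp; omega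
      | cons c t =>
          rw [PySem.Chars.splitOn.go]
          have hp : ([a].isPrefixOf (c :: t)) = (a == c) := by simp [List.isPrefixOf]
          by_cases hac : a = c
          · subst hac
            simp only [hp, beq_self_eq_true, if_pos, List.length_cons, List.length_nil,
              Nat.zero_add, List.drop_succ_cons, List.drop_zero]
            rw [ih t [] (cur.reverse :: acc) (by simpa using Nat.le_of_succ_le_succ h)]
            rw [pvSplitOn_cons]
            simp [pvModifyHead_id]
          · have hb : (a == c) = false := by simpa using hac
            simp only [hp, hb, Bool.false_eq_true, if_false]
            rw [ih t (c :: cur) acc (by simpa using Nat.le_of_succ_le_succ h)]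
            rw [pvSplitOn_cons, if_neg (Ne.symm hac), List.modifyHead_modifyHead]
            simp [Function.comp_def]

lemma pvSplitOn_single (a : Char) (l : List Char) :
    PySem.Chars.splitOn l [a] = l.splitOn a := by
  rw [PySem.Chars.splitOn]
  simpa [pvModifyHead_id] using pvSplitOn_go_single a (l.length + 1) l [] [] (by omega)

-- ---- join with empty separator is flatten ----
lemma pvIntercalate_nil (ws : List (List Char)) : List.intercalate [] ws = ws.flatten := by
  induction ws with
  | nil => simp [List.intercalate]
  | cons w ws ih => cases ws <;> simp_all [List.intercalate, List.intersperse]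

-- list-level capitalize
def pvCapL (w : List Char) : List Char :=
  match w with
  | [] => []
  | c :: rest => PySem.Chars.upperChar c :: PySem.Chars.lower rest

lemma pvCapitalize_toList (s : String) : (pyCapitalize s).toList = pvCapL s.toList := by
  unfold pyCapitalize pvCapL
  cases s.toList <;> simp

-- ---- the heart: capitalize-each-word-of-the-split equals the one-pass fold ----
lemma pvMain (l : List Char) :
    (((l.map pvNorm).splitOn '_').map pvCapL).flatten = camelGo l true
    ∧ ∀ w ws, (l.map pvNorm).splitOn '_' = w :: ws →
        PySem.Chars.lower w ++ ((ws.map pvCapL).flatten) = camelGo l false := by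
  induction l with
  | nil =>
      constructor
      · simp [pvCapL, camelGo]
      · intro w ws h
        simp only [List.map_nil, List.splitOn_nil] at h
        cases h
        simp [PySem.Chars.lower, camelGo]
  | cons c t ih =>
      by_cases hsep : c = ' ' ∨ c = '-' ∨ c = '_'
      · have hn : pvNorm c = '_' := by
          rcases hsep with h | h | h <;> subst h <;> decide
        have hsplit : ((c :: t).map pvNorm).splitOn '_' = [] :: (t.map pvNorm).splitOn '_' := by
          simp [List.map_cons, hn, pvSplitOn_cons]
        constructor
        · rw [hsplit]
          simp only [List.map_cons, List.flatten_cons, pvCapL]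
          rw [List.nil_append, ih.1]
          simp [camelGo, hsep]
        · intro w ws h
          rw [hsplit] at h
          cases h
          simp only [PySem.Chars.lower, List.map_nil, List.nil_append]
          rw [ih.1]
          simp [camelGo, hsep]
      · have hc_us : c ≠ '_' := by intro h; exact hsep (Or.inr (Or.inr h))
        have hn : pvNorm c = PySem.Chars.lowerChar c := by
          have : ¬ (c = ' ' ∨ c = '-') := by
            intro h; rcases h with h | h
            · exact hsep (Or.inl h)
            · exact hsep (Or.inr (Or.inl h))
          simp [pvNorm, this]
        have hne : pvNorm c ≠ '_' := by rw [hn]; exact pvLow_ne_us c hc_us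
        obtain ⟨w, ws, hws⟩ : ∃ w ws, (t.map pvNorm).splitOn '_' = w :: ws := by
          cases h : (t.map pvNorm).splitOn '_' with
          | nil => exact absurd h (List.splitOnP_ne_nil _ _)
          | cons w ws => exact ⟨w, ws, rfl⟩
        have hsplit : ((c :: t).map pvNorm).splitOn '_' = (pvNorm c :: w) :: ws := by
          simp only [List.map_cons, pvSplitOn_cons, if_neg hne, hws, List.modifyHead_cons]
        have hq := ih.2 w ws hws
        constructor
        · rw [hsplit]
          simp only [List.map_cons, List.flatten_cons, pvCapL, PySem.Chars.lower]
          rw [show PySem.Chars.upperChar (pvNorm c) = PySem.Chars.upperChar c by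
                rw [hn]; exact pvUp_low c]
          rw [List.cons_append, ← PySem.Chars.lower, hq]
          conv_rhs => rw [camelGo]
          rw [if_neg hsep]
          simp
        · intro w' ws' h
          rw [hsplit] at h
          cases h
          simp only [PySem.Chars.lower, List.map_cons]
          rw [show PySem.Chars.lowerChar (pvNorm c) = PySem.Chars.lowerChar c by
                rw [hn]; exact pvLow_idem c]
          rw [List.cons_append, ← PySem.Chars.lower, hq]
          conv_rhs => rw [camelGo]
          rw [if_neg hsep]
          simp

-- A's normalized string, as a list, is the per-char pvNorm map
lemma pvClean_toList (page : String) :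
    (PySem.Str.lower (PySem.Str.replace (PySem.Str.replace page " " "_") "-" "_")).toList
      = page.toList.map pvNorm := by
  rw [PySem.Str.toList_lower, PySem.Str.toList_replace, PySem.Str.toList_replace]
  have hsp : (" " : String).toList = [' '] := rfl
  have hus : ("_" : String).toList = ['_'] := rfl
  have hhy : ("-" : String).toList = ['-'] := rfl
  rw [hsp, hus, hhy, pvReplace_single, pvReplace_single]
  rw [PySem.Chars.lower, List.map_map, List.map_map]
  exact List.map_congr_left (fun c _ => pvNorm_comp c)

-- A's dynamic branch equals B
set_option maxHeartbeats 1000000 in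
lemma pvDyn_eq_alt (page : String) :
    pyStrCat
      (PySem.Str.join ""
        (((PySem.Str.split?
            (PySem.Str.lower (PySem.Str.replace (PySem.Str.replace page " " "_") "-" "_"))
            "_").getD []).map pyCapitalize))
      "Locators"
      = get_locator_class_alt page := by
  set pc := PySem.Str.lower (PySem.Str.replace (PySem.Str.replace page " " "_") "-" "_") with hpc
  have hsplit : PySem.Str.split? pc "_"
      = some (((pc.toList.splitOn '_').map String.ofList)) := by
    rw [PySem.Str.split?, PySem.Chars.split?]
    have : ("_" : String).toList = ['_'] := rfl
    rw [this]
    simp [pvSplitOn_single]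
  rw [hsplit]
  simp only [Option.getD_some]
  unfold pyStrCat get_locator_class_alt
  refine congrArg String.ofList ?_
  rw [PySem.Str.toList_join, PySem.Chars.join]
  have : ("" : String).toList = [] := rfl
  rw [this, pvIntercalate_nil]
  rw [List.map_map, List.map_map]
  have hmap : ∀ w : List Char,
      ((String.toList ∘ pyCapitalize) ∘ String.ofList) w = pvCapL w := by
    intro w
    simp only [Function.comp_apply, pvCapitalize_toList, String.toList_ofList]
  rw [List.map_congr_left (fun w _ => hmap w)]
  rw [pvClean_toList]
  rw [(pvMain page.toList).1]

-- the three-entry lookup table is absorbed by the dynamic path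
def pvDyn (pc : String) : String :=
  pyStrCat (PySem.Str.join "" (((PySem.Str.split? pc "_").getD []).map pyCapitalize)) "Locators"

def pvMap : PySem.Dict String String :=
  ((PySem.Dict.empty.insert "login" "LoginLocators").insert
      "signup" "SignupLocators").insert "welcome" "WelcomeLocators"

lemma pvLookup_absorbed (pc : String) :
    (match pvMap.get? pc with
     | some v => v
     | none => pvDyn pc) = pvDyn pc := by
  by_cases h1 : pc = "login"
  · subst h1; decide
  · by_cases h2 : pc = "signup"
    · subst h2; decide
    · by_cases h3 : pc = "welcome"
      · subst h3; decide
      · have h1' : ¬("login" = pc) := fun h => h1 h.symm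
        have h2' : ¬("signup" = pc) := fun h => h2 h.symm
        have h3' : ¬("welcome" = pc) := fun h => h3 h.symm
        have : pvMap.get? pc = none := by
          simp [pvMap, PySem.Dict.get?, PySem.Dict.insert, PySem.Dict.empty, h1', h2', h3']
        simp [this]

theorem pvA_eq_B (page : String) :
    get_locator_class page = get_locator_class_alt page := by
  have h := pvLookup_absorbed
    (PySem.Str.lower (PySem.Str.replace (PySem.Str.replace page " " "_") "-" "_"))
  have hA : get_locator_class page
      = pvDyn (PySem.Str.lower (PySem.Str.replace (PySem.Str.replace page " " "_") "-" "_")) := by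
    simpa only [get_locator_class, pvMap, pvDyn] using h
  rw [hA]
  exact pvDyn_eq_alt page

-- ===== VERDICT (by name: the statement is the Claim_ definition above) =====
theorem get_locator_class_spec : Claim_equal_get_locator_class := by
  intro page _
  show get_locator_class page = get_locator_class_alt page
  exact pvA_eq_B page
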